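-- pv_equiv track=rewrite | github.com/maggienardini/strands-thesis | strands/src/data/grid.py | paths_conflict
-- ===== SOURCE A (Python) =====
-- def canonical_segment(a, b):
--     return tuple(sorted((a, b)))
--
-- def path_segments(path):
--     return [canonical_segment(path[i], path[i + 1]) for i in range(len(path) - 1)]
--
-- def segments_cross(seg1, seg2):
--     (a1, a2) = seg1
--     (b1, b2) = seg2
--
--     # Ignore touching segments; cell overlap is checked separately.
--     if a1 == b1 or a1 == b2 or a2 == b1 or a2 == b2:
--         return False
--
--     ax1, ay1 = a1
--     ax2, ay2 = a2
--     bx1, by1 = b1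
--     bx2, by2 = b2
--
--     # In this grid, true visual crossing without shared endpoints happens
--     # only for opposite diagonals across the same 2x2 square.
--     da_x = ax2 - ax1
--     da_y = ay2 - ay1
--     db_x = bx2 - bx1
--     db_y = by2 - by1
--
--     return (
--         abs(da_x) == 1
--         and abs(da_y) == 1
--         and abs(db_x) == 1
--         and abs(db_y) == 1
--         and (ax1 + ax2) == (bx1 + bx2)
--         and (ay1 + ay2) == (by1 + by2)
--         and (da_x * db_x + da_y * db_y) == 0
--     )
--
-- def paths_conflict(path_a, path_b):
--     if set(path_a) & set(path_b):
--         return True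
--
--     seg_a = path_segments(path_a)
--     seg_b = path_segments(path_b)
--     for sa in seg_a:
--         for sb in seg_b:
--             if segments_cross(sa, sb):
--                 return True
--     return False
-- ===== SOURCE B (Python) =====
-- def paths_conflict(path_a, path_b):
--     # Hash-based: shared-cell test via one set; crossings via indexing path_a's
--     # diagonal segments by the center of their 2x2 square.
--     cells_a = set(path_a)
--     if any(c in cells_a for c in path_b):
--         return True
--     centers = set()
--     for p, q in zip(path_a, path_a[1:]):
--         if abs(q[0] - p[0]) == 1 and abs(q[1] - p[1]) == 1:
--             centers.add((p[0] + q[0], p[1] + q[1]))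
--     for p, q in zip(path_b, path_b[1:]):
--         if abs(q[0] - p[0]) == 1 and abs(q[1] - p[1]) == 1 \
--                 and (p[0] + q[0], p[1] + q[1]) in centers:
--             return True
--     return False
-- ===== Notes on version B (the rewrite author's own statement) =====
-- stated objective: faster
-- what changed: Replaced the O(n*m) all-pairs segment-crossing scan by hash sets: one set of path_a's cells for the overlap test, and a set of the 2x2-square centers of path_a's diagonal segments looked up once per path_b segment (valid because after the overlap test the paths share no cells, so a matching center implies the opposite diagonal).
import Mathlib
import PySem

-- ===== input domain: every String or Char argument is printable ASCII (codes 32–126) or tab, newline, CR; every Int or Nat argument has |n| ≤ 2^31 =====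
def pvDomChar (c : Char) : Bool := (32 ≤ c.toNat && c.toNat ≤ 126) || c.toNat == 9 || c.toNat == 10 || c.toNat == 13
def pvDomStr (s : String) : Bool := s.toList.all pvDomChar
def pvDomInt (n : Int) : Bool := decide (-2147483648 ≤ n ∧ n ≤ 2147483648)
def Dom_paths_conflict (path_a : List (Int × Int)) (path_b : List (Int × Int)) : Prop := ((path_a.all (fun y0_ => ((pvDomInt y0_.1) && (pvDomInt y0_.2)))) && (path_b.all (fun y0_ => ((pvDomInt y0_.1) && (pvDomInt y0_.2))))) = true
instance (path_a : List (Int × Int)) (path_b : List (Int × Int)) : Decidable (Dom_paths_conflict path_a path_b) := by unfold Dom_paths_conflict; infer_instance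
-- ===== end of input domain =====

-- B replaces A's O(n*m) pairwise segment-crossing scan with hash-set lookups (shared cells, then
-- path_a's diagonal-segment 2x2-centers indexed in a set) — an asymptotically faster algorithm.

-- ===== PORT A =====
def pyCanon (a b : Int × Int) : (Int × Int) × (Int × Int) :=
  if a.1 < b.1 ∨ (a.1 = b.1 ∧ a.2 ≤ b.2) then (a, b) else (b, a)

def path_segments (path : List (Int × Int)) : List ((Int × Int) × (Int × Int)) :=
  (path.zip path.tail).map (fun pq => pyCanon pq.1 pq.2)

def segments_cross (seg1 seg2 : (Int × Int) × (Int × Int)) : Bool :=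
  let a1 := seg1.1; let a2 := seg1.2; let b1 := seg2.1; let b2 := seg2.2
  if a1 = b1 ∨ a1 = b2 ∨ a2 = b1 ∨ a2 = b2 then false
  else
    let da_x := a2.1 - a1.1; let da_y := a2.2 - a1.2
    let db_x := b2.1 - b1.1; let db_y := b2.2 - b1.2
    (da_x.natAbs == 1) && (da_y.natAbs == 1) && (db_x.natAbs == 1) && (db_y.natAbs == 1) &&
    ((a1.1 + a2.1) == (b1.1 + b2.1)) && ((a1.2 + a2.2) == (b1.2 + b2.2)) &&
    ((da_x * db_x + da_y * db_y) == 0)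

def paths_conflict (path_a : List (Int × Int)) (path_b : List (Int × Int)) : Bool :=
  if !(PySem.Set.inter (PySem.Set.ofList path_a) (PySem.Set.ofList path_b)).isEmpty then true
  else
    (path_segments path_a).any (fun sa =>
      (path_segments path_b).any (fun sb => segments_cross sa sb))

-- ===== PORT B =====
def pvIsDiag (p q : Int × Int) : Bool := ((q.1 - p.1).natAbs == 1) && ((q.2 - p.2).natAbs == 1)

def pvCenter (p q : Int × Int) : Int × Int := (p.1 + q.1, p.2 + q.2)

def paths_conflict_alt (path_a : List (Int × Int)) (path_b : List (Int × Int)) : Bool :=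
  let cells_a := PySem.Set.ofList path_a
  if path_b.any (fun c => PySem.Set.contains cells_a c) then true
  else
    let centers := (path_a.zip path_a.tail).foldl
      (fun s pq => if pvIsDiag pq.1 pq.2 then PySem.Set.add s (pvCenter pq.1 pq.2) else s)
      PySem.Set.empty
    (path_b.zip path_b.tail).any
      (fun pq => pvIsDiag pq.1 pq.2 && PySem.Set.contains centers (pvCenter pq.1 pq.2))

-- ===== PRECONDITION & SPEC =====
def Spec_paths_conflict (path_a : List (Int × Int)) (path_b : List (Int × Int)) (out : Bool) : Prop := out = paths_conflict_alt path_a path_b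
instance (path_a : List (Int × Int)) (path_b : List (Int × Int)) (out : Bool) : Decidable (Spec_paths_conflict path_a path_b out) := by unfold Spec_paths_conflict; infer_instance

-- ===== CLAIM (what is proved, stated in full; the proofs are below) =====
def Claim_equal_paths_conflict : Prop := ∀ (path_a : List (Int × Int)) (path_b : List (Int × Int)), Dom_paths_conflict path_a path_b → Spec_paths_conflict path_a path_b (paths_conflict path_a path_b)

-- ===== LEMMAS AND PROOFS =====

-- A's overlap test (nonempty set intersection) equals B's overlap test (any path_b cell in cells_a).
theorem overlap_eq (a b : List (Int × Int)) :
    (!(PySem.Set.inter (PySem.Set.ofList a) (PySem.Set.ofList b)).isEmpty)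
      = b.any (fun c => PySem.Set.contains (PySem.Set.ofList a) c) := by
  rw [Bool.eq_iff_iff]
  simp only [Bool.not_eq_eq_eq_not, Bool.not_true, List.isEmpty_eq_false_iff_exists_mem,
    List.any_eq_true, PySem.Set.contains_iff, PySem.Set.mem_inter, PySem.Set.mem_ofList]
  tauto

-- When both segments' endpoints are pairwise distinct, A's crossing test reduces to
-- "both diagonal with the same 2x2-square center" (the dot-product conjunct is implied).
theorem cross_core (p q r s : Int × Int) (hpr : p ≠ r) (hps : p ≠ s) (hqr : q ≠ r) (hqs : q ≠ s) :
    segments_cross (p, q) (r, s)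
      = (pvIsDiag p q && pvIsDiag r s && decide (pvCenter p q = pvCenter r s)) := by
  obtain ⟨px, py⟩ := p; obtain ⟨qx, qy⟩ := q; obtain ⟨rx, ry⟩ := r; obtain ⟨sx, sy⟩ := s
  have hguard : ¬((px,py) = (rx,ry) ∨ (px,py) = (sx,sy) ∨ (qx,qy) = (rx,ry) ∨ (qx,qy) = (sx,sy)) := by
    tauto
  rw [Bool.eq_iff_iff]
  simp only [segments_cross]
  rw [if_neg hguard]
  simp only [pvIsDiag, pvCenter, Bool.and_eq_true, beq_iff_eq, decide_eq_true_eq, Prod.mk.injEq,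
    and_assoc]
  constructor
  · rintro ⟨h1, h2, h3, h4, h5, h6, h7⟩
    exact ⟨h1, h2, h3, h4, h5, h6⟩
  · rintro ⟨h1, h2, h3, h4, h5, h6⟩
    refine ⟨h1, h2, h3, h4, h5, h6, ?_⟩
    have e1 : qx - px = 1 ∨ qx - px = -1 := by omega
    have e2 : qy - py = 1 ∨ qy - py = -1 := by omega
    have e3 : sx - rx = 1 ∨ sx - rx = -1 := by omega
    have e4 : sy - ry = 1 ∨ sy - ry = -1 := by omega
    have hne : ¬(px = rx ∧ py = ry) := by simpa [Prod.ext_iff] using hpr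
    have hne2 : ¬(qx = rx ∧ qy = ry) := by simpa [Prod.ext_iff] using hqr
    rcases e1 with e1|e1 <;> rcases e2 with e2|e2 <;> rcases e3 with e3|e3 <;> rcases e4 with e4|e4 <;>
      rw [e1, e2, e3, e4] <;> omega

theorem pvIsDiag_swap (p q : Int × Int) : pvIsDiag q p = pvIsDiag p q := by
  simp only [pvIsDiag]
  rw [show (p.1 - q.1).natAbs = (q.1 - p.1).natAbs by omega,
      show (p.2 - q.2).natAbs = (q.2 - p.2).natAbs by omega]

theorem pvCenter_swap (p q : Int × Int) : pvCenter q p = pvCenter p q := by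
  simp only [pvCenter, Prod.mk.injEq]; omega

theorem cross_canon (p q r s : Int × Int) (hpr : p ≠ r) (hps : p ≠ s) (hqr : q ≠ r) (hqs : q ≠ s) :
    segments_cross (pyCanon p q) (pyCanon r s)
      = (pvIsDiag p q && pvIsDiag r s && decide (pvCenter p q = pvCenter r s)) := by
  unfold pyCanon
  split_ifs
  · rw [cross_core p q r s hpr hps hqr hqs]
  · rw [cross_core p q s r hps hpr hqs hqr, pvIsDiag_swap r s, pvCenter_swap r s]
  · rw [cross_core q p r s hqr hqs hpr hps, pvIsDiag_swap p q, pvCenter_swap p q]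
  · rw [cross_core q p s r hqs hqr hps hpr, pvIsDiag_swap p q, pvCenter_swap p q,
        pvIsDiag_swap r s, pvCenter_swap r s]

-- Membership in B's folded set of diagonal-segment centers.
theorem mem_centersFold (l : List ((Int × Int) × (Int × Int))) (s : List (Int × Int)) (y : Int × Int) :
    y ∈ l.foldl (fun s pq => if pvIsDiag pq.1 pq.2 then PySem.Set.add s (pvCenter pq.1 pq.2) else s) s
      ↔ y ∈ s ∨ ∃ pq ∈ l, pvIsDiag pq.1 pq.2 = true ∧ y = pvCenter pq.1 pq.2 := by
  induction l generalizing s with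
  | nil => simp
  | cons hd tl ih =>
    simp only [List.foldl_cons, List.mem_cons, ih]
    by_cases h : pvIsDiag hd.1 hd.2
    · rw [if_pos h]
      simp only [PySem.Set.mem_add]
      constructor
      · rintro (⟨hs | he⟩ | ⟨pq, hm, hd2, hc⟩)
        · exact Or.inl hs
        · exact Or.inr ⟨hd, Or.inl rfl, h, he⟩
        · exact Or.inr ⟨pq, Or.inr hm, hd2, hc⟩
      · rintro (hs | ⟨pq, (rfl | hm), hd2, hc⟩)
        · exact Or.inl (Or.inl hs)
        · exact Or.inl (Or.inr hc)
        · exact Or.inr ⟨pq, hm, hd2, hc⟩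
    · rw [if_neg h]
      constructor
      · rintro (hs | ⟨pq, hm, hd2, hc⟩)
        · exact Or.inl hs
        · exact Or.inr ⟨pq, Or.inr hm, hd2, hc⟩
      · rintro (hs | ⟨pq, (rfl | hm), hd2, hc⟩)
        · exact Or.inl hs
        · exact absurd hd2 h
        · exact Or.inr ⟨pq, hm, hd2, hc⟩

theorem mem_of_mem_zip_tail {l : List (Int × Int)} {pq : (Int × Int) × (Int × Int)}
    (h : pq ∈ l.zip l.tail) : pq.1 ∈ l ∧ pq.2 ∈ l := by
  obtain ⟨h1, h2⟩ := List.of_mem_zip h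
  exact ⟨h1, List.mem_of_mem_tail h2⟩

-- With disjoint cell sets, A's pairwise crossing scan equals B's center-set lookup.
theorem main_eq (path_a path_b : List (Int × Int))
    (hdisj : ∀ c ∈ path_b, c ∉ path_a) :
    (path_segments path_a).any (fun sa => (path_segments path_b).any (fun sb => segments_cross sa sb))
      = (path_b.zip path_b.tail).any (fun pq => pvIsDiag pq.1 pq.2 &&
          PySem.Set.contains ((path_a.zip path_a.tail).foldl
            (fun s pq => if pvIsDiag pq.1 pq.2 then PySem.Set.add s (pvCenter pq.1 pq.2) else s)
            PySem.Set.empty) (pvCenter pq.1 pq.2)) := by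
  rw [Bool.eq_iff_iff]
  simp only [path_segments, List.any_map, Function.comp, List.any_eq_true, Bool.and_eq_true,
    PySem.Set.contains_iff, mem_centersFold, PySem.Set.empty, List.not_mem_nil, false_or]
  have hne : ∀ x ∈ path_a, ∀ y ∈ path_b, x ≠ y := fun x hx y hy e => hdisj y hy (e ▸ hx)
  constructor
  · rintro ⟨pq, hpq, rs, hrs, hc⟩
    obtain ⟨hp, hq⟩ := mem_of_mem_zip_tail hpq
    obtain ⟨hr, hs⟩ := mem_of_mem_zip_tail hrs
    rw [cross_canon _ _ _ _ (hne _ hp _ hr) (hne _ hp _ hs) (hne _ hq _ hr) (hne _ hq _ hs)] at hc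
    simp only [Bool.and_eq_true, decide_eq_true_eq] at hc
    exact ⟨rs, hrs, hc.1.2, pq, hpq, hc.1.1, hc.2.symm⟩
  · rintro ⟨rs, hrs, hdiag, pq, hpq, hdiag2, hcent⟩
    obtain ⟨hp, hq⟩ := mem_of_mem_zip_tail hpq
    obtain ⟨hr, hs⟩ := mem_of_mem_zip_tail hrs
    refine ⟨pq, hpq, rs, hrs, ?_⟩
    rw [cross_canon _ _ _ _ (hne _ hp _ hr) (hne _ hp _ hs) (hne _ hq _ hr) (hne _ hq _ hs)]
    simp [hdiag, hdiag2, hcent]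

-- ===== VERDICT (by name: the statement is the Claim_ definition above) =====
theorem paths_conflict_spec : Claim_equal_paths_conflict := by
  intro path_a path_b _
  show paths_conflict path_a path_b = paths_conflict_alt path_a path_b
  unfold paths_conflict paths_conflict_alt
  rw [overlap_eq]
  by_cases hov : path_b.any (fun c => PySem.Set.contains (PySem.Set.ofList path_a) c) = true
  · simp only [hov, if_true]
  · have hdisj : ∀ c ∈ path_b, c ∉ path_a := by
      intro c hc ha
      exact hov (List.any_eq_true.mpr ⟨c, hc, (PySem.Set.contains_iff _ _).mpr
        ((PySem.Set.mem_ofList _ _).mpr ha)⟩)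
    rw [if_neg hov, if_neg hov]
    exact main_eq path_a path_b hdisj
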